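-- pv_equiv track=rewrite | github.com/richardlford/py-utils | poly-to-astree.py | get_file_partition_indices
-- ===== SOURCE A (Python) =====
-- from typing import Dict, List, Set, FrozenSet
--
-- FileName = str
--
-- def get_file_partition_indices(part_dict: Dict[FileName, List[str]], partition) -> Dict[FileName, List[int]]:
--     result = {}
--     for file in part_dict:
--         parts = part_dict[file]
--         part_set = set(parts)
--         file_result = []
--         result[file] = file_result
--         for i in range(len(partition)):
--             parti = partition[i]
--             if parti <= part_set:
--                 file_result.append(i)
--         pass
--     return result
-- ===== SOURCE B (Python) =====
-- def get_file_partition_indices(part_dict, partition):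
--     n = len(partition)
--     sizes = [len(block) for block in partition]
--     inv = {}
--     for i in range(n):
--         for x in partition[i]:
--             inv.setdefault(x, []).append(i)
--     result = {}
--     for file, parts in part_dict.items():
--         cnt = [0] * n
--         for x in set(parts):
--             for i in inv.get(x, []):
--                 cnt[i] += 1
--         result[file] = [i for i in range(n) if cnt[i] == sizes[i]]
--     return result
-- ===== Notes on version B (the rewrite author's own statement) =====
-- stated objective: alternative
-- what changed: B builds one inverted index element->list of block indices for the whole partition and, per file, counts hits per block over the file's distinct parts and compares the hit count to the block size, instead of re-testing every partition block against every file's part set.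
import Mathlib
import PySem

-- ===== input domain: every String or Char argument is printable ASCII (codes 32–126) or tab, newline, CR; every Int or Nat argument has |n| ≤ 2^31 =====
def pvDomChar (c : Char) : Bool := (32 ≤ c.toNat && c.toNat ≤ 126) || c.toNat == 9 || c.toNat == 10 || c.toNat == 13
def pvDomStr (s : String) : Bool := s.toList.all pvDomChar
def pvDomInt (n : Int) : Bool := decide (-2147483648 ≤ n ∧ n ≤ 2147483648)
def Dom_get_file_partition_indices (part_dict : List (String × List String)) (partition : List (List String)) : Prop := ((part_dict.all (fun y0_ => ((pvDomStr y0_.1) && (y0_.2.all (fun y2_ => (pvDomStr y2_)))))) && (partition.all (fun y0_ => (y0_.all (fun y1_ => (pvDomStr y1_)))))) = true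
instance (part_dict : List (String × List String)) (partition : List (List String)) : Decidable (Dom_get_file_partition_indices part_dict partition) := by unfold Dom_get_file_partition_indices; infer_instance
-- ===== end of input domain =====

-- B replaces A's block-by-block subset re-tests with one inverted index (element -> block
-- indices) plus per-file hit counting — a genuinely different traversal of the same data
-- (objective: alternative; not measured faster).

-- ===== PORT A =====
-- Port of A. `for file in part_dict` with `parts = part_dict[file]` is iterated as the
-- dict's items: for each iterated key, `part_dict[file]` is exactly the paired value.
def get_file_partition_indices (part_dict : List (String × List String)) (partition : List (List String)) : List (String × List Int) :=
  (PySem.Dict.ofList part_dict).items.foldl (fun result p =>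
    let parts := p.2
    let part_set : PySem.Set String := PySem.Set.ofList parts
    let file_result : List Int :=
      (PySem.List.pyRange 0 (partition.length : Int) 1).foldl (fun fr i =>
        let parti := PySem.List.pyGetD partition i []   -- partition[i], 0 ≤ i < len: never raises
        if parti.all (fun x => PySem.Set.contains part_set x) then fr ++ [i] else fr) []
    result ++ [(p.1, file_result)]) []

-- ===== PORT B =====
-- inv: the inverted index {element: [block indices containing it]} (Source B's `inv`)
def pvInvB (partition : List (List String)) : PySem.Dict String (List Nat) :=
  (List.range partition.length).foldl (fun d i =>
    (partition.getD i []).foldl (fun d x => d.modify x [] (· ++ [i])) d) PySem.Dict.empty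

-- cnt: per-file hit counter per block (Source B's `cnt`); every stored index is < n, so
-- `cnt[i] += 1` is `List.set` at an in-range position
def pvCntB (inv : PySem.Dict String (List Nat)) (parts : List String) (n : Nat) : List Int :=
  (PySem.Set.ofList parts).foldl (fun cnt x =>
    (inv.getD x []).foldl (fun cnt i => cnt.set i (cnt.getD i 0 + 1)) cnt) (List.replicate n 0)

def get_file_partition_indices_alt (part_dict : List (String × List String)) (partition : List (List String)) : List (String × List Int) :=
  let n := partition.length
  let sizes : List Int := partition.map (fun block => (block.length : Int))
  let inv := pvInvB partition
  (PySem.Dict.ofList part_dict).items.foldl (fun result p =>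
    let cnt := pvCntB inv p.2 n
    result ++ [(p.1, ((List.range n).filter (fun i => cnt.getD i 0 == sizes.getD i 0)).map (fun i : Nat => (i : Int)))]) []

-- ===== PRECONDITION & SPEC =====
def Spec_get_file_partition_indices (part_dict : List (String × List String)) (partition : List (List String)) (out : List (String × List Int)) : Prop := out = get_file_partition_indices_alt part_dict partition
instance (part_dict : List (String × List String)) (partition : List (List String)) (out : List (String × List Int)) : Decidable (Spec_get_file_partition_indices part_dict partition out) := by unfold Spec_get_file_partition_indices; infer_instance

-- ===== CLAIM (what is proved, stated in full; the proofs are below) =====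
def Claim_equal_get_file_partition_indices : Prop := ∀ (part_dict : List (String × List String)) (partition : List (List String)), Dom_get_file_partition_indices part_dict partition → Spec_get_file_partition_indices part_dict partition (get_file_partition_indices part_dict partition)

-- ===== LEMMAS AND PROOFS =====

-- one block's contribution to the inverted index
theorem pv_inner_modify (b : List String) (i : Nat) (d : PySem.Dict String (List Nat)) (x : String) :
    (b.foldl (fun d x' => d.modify x' [] (· ++ [i])) d).getD x []
      = d.getD x [] ++ List.replicate (b.filter (fun y => y == x)).length i := by
  have h := PySem.Dict.getD_foldl_modify_append (b.map (fun x' => (x', i))) d x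
  rw [List.foldl_map] at h
  rw [h, List.filter_map, List.map_map]
  simp [Function.comp_def, List.map_const']

-- the inverted index, characterised
theorem pv_inv_getD (partition : List (List String)) (x : String) :
    (pvInvB partition).getD x []
      = (List.range partition.length).flatMap
          (fun i => List.replicate ((partition.getD i []).filter (fun y => y == x)).length i) := by
  unfold pvInvB
  suffices aux : ∀ (L : List Nat) (d : PySem.Dict String (List Nat)),
      (L.foldl (fun d i => (partition.getD i []).foldl (fun d x => d.modify x [] (· ++ [i])) d) d).getD x []
        = d.getD x [] ++ L.flatMap (fun i => List.replicate ((partition.getD i []).filter (fun y => y == x)).length i) by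
    simpa using aux (List.range partition.length) PySem.Dict.empty
  intro L
  induction L with
  | nil => intro d; simp
  | cons a t ih =>
    intro d
    rw [List.foldl_cons, ih, pv_inner_modify, List.flatMap_cons, List.append_assoc]

theorem pv_sum_range_ite (n j : Nat) (c : Nat → Nat) :
    ((List.range n).map (fun i => if i = j then c i else 0)).sum = if j < n then c j else 0 := by
  induction n with
  | zero => simp
  | succ m ih =>
    rw [List.range_succ, List.map_append, List.sum_append, ih]
    simp only [List.map_cons, List.map_nil, List.sum_cons, List.sum_nil]
    by_cases h1 : j < m
    · rw [if_pos h1, if_neg (by omega : ¬ m = j), if_pos (by omega : j < m + 1)]; omega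
    · by_cases h2 : m = j
      · subst h2; rw [if_neg h1, if_pos rfl, if_pos (by omega)]; omega
      · rw [if_neg h1, if_neg h2, if_neg (by omega : ¬ j < m + 1)]; omega

theorem pv_count_flatMap (L : List Nat) (g : Nat → List Nat) (j : Nat) :
    (L.flatMap g).count j = (L.map (fun i => (g i).count j)).sum := by
  induction L with
  | nil => simp
  | cons a t ih => simp [List.count_append, ih]

-- how often block j is hit by element x = how often x occurs in block j
theorem pv_inv_count (partition : List (List String)) (x : String) (j : Nat) :
    ((pvInvB partition).getD x []).count j = (partition.getD j []).count x := by
  rw [pv_inv_getD, pv_count_flatMap]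
  have h1 : ∀ i : Nat, ((List.replicate ((partition.getD i []).filter (fun y => y == x)).length i).count j)
      = if i = j then (partition.getD i []).count x else 0 := by
    intro i
    rw [List.count_replicate, List.count_eq_length_filter]
    by_cases h : i = j <;> simp [h]
  simp only [h1, pv_sum_range_ite]
  by_cases h : j < partition.length
  · simp [h]
  · rw [List.getD_eq_default _ _ (by omega)]; simp [h]

theorem pv_inv_mem_lt (partition : List (List String)) (x : String) {i : Nat}
    (h : i ∈ (pvInvB partition).getD x []) : i < partition.length := by
  rw [pv_inv_getD] at h
  simp only [List.mem_flatMap, List.mem_range, List.mem_replicate] at h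
  obtain ⟨a, ha, -, rfl⟩ := h
  exact ha

theorem pv_bump_length (I : List Nat) (c : List Int) :
    (I.foldl (fun c i => c.set i (c.getD i 0 + 1)) c).length = c.length := by
  induction I generalizing c with
  | nil => rfl
  | cons a t ih => rw [List.foldl_cons, ih]; simp

theorem pv_bump_getD (I : List Nat) (c : List Int) (h : ∀ i ∈ I, i < c.length) (j : Nat) :
    (I.foldl (fun c i => c.set i (c.getD i 0 + 1)) c).getD j 0 = c.getD j 0 + (I.count j : Int) := by
  induction I generalizing c with
  | nil => simp
  | cons a t ih =>
    have ha : a < c.length := h a (by simp)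
    rw [List.foldl_cons, ih _ (fun i hi => by rw [List.length_set]; exact h i (List.mem_cons_of_mem _ hi))]
    have hset : (c.set a (c.getD a 0 + 1)).getD j 0 = c.getD j 0 + if j = a then 1 else 0 := by
      rw [List.getD_eq_getElem?_getD, List.getElem?_set, List.getD_eq_getElem?_getD]
      by_cases hj : a = j
      · subst hj; simp [ha, List.getD_eq_getElem?_getD]
      · have hj' : ¬ j = a := fun hh => hj hh.symm
        simp [hj, hj']
    rw [hset, List.count_cons]
    by_cases hj : j = a
    · simp [hj]; ring
    · have hj' : ¬ a = j := fun hh => hj hh.symm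
      simp [hj, hj']

-- the per-file counter, characterised
theorem pv_cnt_getD (partition : List (List String)) (parts : List String) (j : Nat) :
    (pvCntB (pvInvB partition) parts partition.length).getD j 0
      = ((PySem.Set.ofList parts).map (fun x => ((partition.getD j []).count x : Int))).sum := by
  unfold pvCntB
  suffices aux : ∀ (S : List String) (c : List Int), c.length = partition.length →
      (S.foldl (fun cnt x => ((pvInvB partition).getD x []).foldl (fun cnt i => cnt.set i (cnt.getD i 0 + 1)) cnt) c).getD j 0
        = c.getD j 0 + (S.map (fun x => ((partition.getD j []).count x : Int))).sum by
    rw [aux (PySem.Set.ofList parts) (List.replicate partition.length 0) (by simp)]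
    rw [List.getD_eq_getElem?_getD, List.getElem?_replicate]
    split <;> simp
  intro S
  induction S with
  | nil => intro c _; simp
  | cons x t ih =>
    intro c hc
    rw [List.foldl_cons, ih _ (by rw [pv_bump_length]; exact hc),
      pv_bump_getD _ _ (fun i hi => hc ▸ pv_inv_mem_lt partition x hi), pv_inv_count]
    rw [List.map_cons, List.sum_cons]
    ring

theorem pv_sum_indicator (S : List String) (cb : String) (hS : S.Nodup) :
    (S.map (fun x => if cb == x then 1 else 0)).sum = if cb ∈ S then 1 else 0 := by
  induction S with
  | nil => simp
  | cons s ss ih =>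
    have hns : s ∉ ss := (List.nodup_cons.1 hS).1
    rw [List.map_cons, List.sum_cons, ih (List.nodup_cons.1 hS).2]
    by_cases h : s = cb
    · subst h; simp [hns]
    · have h2 : cb ≠ s := fun hh => h hh.symm
      simp [h2, List.mem_cons]

theorem pv_sum_map_add (S : List String) (f g : String → Nat) :
    (S.map (fun x => f x + g x)).sum = (S.map f).sum + (S.map g).sum := by
  induction S with
  | nil => rfl
  | cons s ss ih => rw [List.map_cons, List.sum_cons, ih, List.map_cons, List.sum_cons, List.map_cons, List.sum_cons]; omega

theorem pv_sum_count_eq_countP_nat (S b : List String) (hS : S.Nodup) :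
    (S.map (fun x => b.count x)).sum = b.countP (fun y => decide (y ∈ S)) := by
  induction b with
  | nil => simp
  | cons cb t ih =>
    simp only [List.count_cons, List.countP_cons]
    rw [pv_sum_map_add, ih, pv_sum_indicator S cb hS]
    by_cases h : cb ∈ S <;> simp [h]

theorem pv_sum_count_eq_countP (S b : List String) (hS : S.Nodup) :
    (S.map (fun x => (b.count x : Int))).sum = (b.countP (fun y => decide (y ∈ S)) : Int) := by
  have h1 : (S.map (fun x => (b.count x : Int))) = (S.map (fun x => b.count x)).map (fun n : Nat => (n : Int)) := by
    rw [List.map_map]; rfl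
  rw [h1, ← Nat.cast_list_sum, pv_sum_count_eq_countP_nat S b hS]

theorem pv_decide_eq_beq (x y : Int) : decide (x = y) = (x == y) := by
  by_cases h : x = y <;> simp [h]

-- boolean bridge: "block is a subset of parts" = "hit count equals block size"
theorem pv_all_eq_decide (b : List String) (p : String → Bool) :
    b.all p = decide ((b.countP p : Int) = (b.length : Int)) := by
  by_cases h : ∀ x ∈ b, p x
  · simp [List.all_eq_true.2 h, List.countP_eq_length.2 h]
  · have h1 : b.all p = false := by simpa using h
    have h2 : b.countP p ≠ b.length := fun hc => h (List.countP_eq_length.1 hc)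
    simp [h1, h2]

-- the two per-file result lists coincide
theorem pv_file_eq (partition : List (List String)) (parts : List String) :
    (PySem.List.pyRange 0 (partition.length : Int) 1).foldl (fun fr i =>
        if (PySem.List.pyGetD partition i []).all (fun x => PySem.Set.contains (PySem.Set.ofList parts) x)
        then fr ++ [i] else fr) []
      = ((List.range partition.length).filter (fun i =>
            (pvCntB (pvInvB partition) parts partition.length).getD i 0
              == (partition.map (fun block => (block.length : Int))).getD i 0)).map (fun i : Nat => (i : Int)) := by
  rw [PySem.List.foldl_append_if_eq_filter, List.nil_append, PySem.List.pyRange_zero_natCast, List.filter_map]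
  refine congrArg (List.map _) (List.filter_congr ?_)
  intro k hk
  have hk' : k < partition.length := List.mem_range.1 hk
  simp only [Function.comp_def, PySem.List.pyGetD_natCast]
  have hsz : (partition.map (fun block => (block.length : Int))).getD k 0
      = ((partition.getD k []).length : Int) := by
    rw [List.getD_eq_getElem?_getD, List.getElem?_map, List.getElem?_eq_getElem hk',
      List.getD_eq_getElem?_getD, List.getElem?_eq_getElem hk']
    rfl
  rw [hsz, pv_cnt_getD, pv_sum_count_eq_countP _ _ (PySem.Set.nodup_ofList parts)]
  have hpred : (fun x => PySem.Set.contains (PySem.Set.ofList parts) x)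
      = (fun y => decide (y ∈ PySem.Set.ofList parts)) := by
    funext y
    simp [PySem.Set.contains]
  rw [hpred]
  simp only [PySem.Set.mem_ofList]
  rw [pv_all_eq_decide, pv_decide_eq_beq]

-- ===== VERDICT (by name: the statement is the Claim_ definition above) =====
theorem get_file_partition_indices_spec : Claim_equal_get_file_partition_indices := by
  intro part_dict partition _
  unfold Spec_get_file_partition_indices get_file_partition_indices get_file_partition_indices_alt
  rw [PySem.List.foldl_append_singleton_eq_map
        (f := fun p : String × List String => (p.1,
          (PySem.List.pyRange 0 (partition.length : Int) 1).foldl (fun fr i =>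
            if (PySem.List.pyGetD partition i []).all (fun x => PySem.Set.contains (PySem.Set.ofList p.2) x)
            then fr ++ [i] else fr) [])),
      PySem.List.foldl_append_singleton_eq_map
        (f := fun p : String × List String => (p.1,
          ((List.range partition.length).filter (fun i =>
            (pvCntB (pvInvB partition) p.2 partition.length).getD i 0
              == (partition.map (fun block => (block.length : Int))).getD i 0)).map (fun i : Nat => (i : Int))))]
  simp only [List.nil_append]
  exact List.map_congr_left (fun p _ => congrArg (Prod.mk p.1) (pv_file_eq partition p.2))
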